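-- pv_equiv track=rewrite | github.com/ZahraMivehi/NamedEntityRecognition | feature.py | wordShap
-- ===== SOURCE A (Python) =====
-- def wordShap(token):
--     #if index<0 or index>lst.count
--     #token=lst[index]
--     A=0
--     a=0
--     d=0
--     z=0
--     if token=="":
--         return "z1"
--     ws=""
--     for c in token:
--         if c.isupper():
--             A+=1
--         elif c.islower():
--             a+=1
--         elif c.isnumeric():
--             d+=1
--         else:
--             z+=1
--     if A>0:
--         ws=ws+"A"+str(A)
--     if a>0:
--         ws=ws+"a"+str(a)
--     if d>0:
--         ws=ws+"d"+str(d)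
--     if z>0:
--         ws=ws+"z"+str(z)
--     return ws
-- ===== SOURCE B (Python) =====
-- def wordShap(token):
--     if token == "":
--         return "z1"
--     cats = [
--         ("A", sum(1 for c in token if c.isupper())),
--         ("a", sum(1 for c in token if c.islower())),
--         ("d", sum(1 for c in token if c.isnumeric())),
--         ("z", sum(1 for c in token
--                   if not (c.isupper() or c.islower() or c.isnumeric()))),
--     ]
--     return "".join(letter + str(n) for letter, n in cats if n > 0)
-- ===== Notes on version B (the rewrite author's own statement) =====
-- stated objective: alternative
-- what changed: Replaces the single four-accumulator counting loop and the chain of manual string concatenations by four independent category counts and a join over a (label, count) table filtered to positive counts.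
import Mathlib
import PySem

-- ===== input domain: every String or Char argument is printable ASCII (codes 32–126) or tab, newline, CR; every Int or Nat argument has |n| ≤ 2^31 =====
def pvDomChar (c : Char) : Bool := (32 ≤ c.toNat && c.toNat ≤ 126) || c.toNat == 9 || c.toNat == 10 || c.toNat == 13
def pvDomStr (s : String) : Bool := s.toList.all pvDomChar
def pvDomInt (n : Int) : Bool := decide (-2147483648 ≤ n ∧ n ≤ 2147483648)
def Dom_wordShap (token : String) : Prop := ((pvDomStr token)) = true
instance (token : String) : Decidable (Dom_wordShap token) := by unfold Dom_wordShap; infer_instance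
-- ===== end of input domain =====

-- B replaces A's single four-accumulator loop and manual concatenation chain by four
-- independent category counts joined from a filtered (label, count) table (objective: alternative).
-- On the ASCII domain c.isnumeric() coincides with c.isdigit(), ported as PySem.Chars.isdigit.

-- ===== PORT A =====
def wordShap (token : String) : String :=
  if token = "" then "z1"
  else
    let counts := token.toList.foldl
      (fun (acc : Int × Int × Int × Int) c =>
        if PySem.Chars.isupper c then (acc.1 + 1, acc.2.1, acc.2.2.1, acc.2.2.2)
        else if PySem.Chars.islower c then (acc.1, acc.2.1 + 1, acc.2.2.1, acc.2.2.2)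
        else if PySem.Chars.isdigit c then (acc.1, acc.2.1, acc.2.2.1 + 1, acc.2.2.2)
        else (acc.1, acc.2.1, acc.2.2.1, acc.2.2.2 + 1)) (0, 0, 0, 0)
    let ws := ""
    let ws := if counts.1 > 0 then ws ++ "A" ++ PySem.Int.toStr counts.1 else ws
    let ws := if counts.2.1 > 0 then ws ++ "a" ++ PySem.Int.toStr counts.2.1 else ws
    let ws := if counts.2.2.1 > 0 then ws ++ "d" ++ PySem.Int.toStr counts.2.2.1 else ws
    let ws := if counts.2.2.2 > 0 then ws ++ "z" ++ PySem.Int.toStr counts.2.2.2 else ws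
    ws

-- ===== PORT B =====
def wordShap_alt (token : String) : String :=
  if token = "" then "z1"
  else
    let cs := token.toList
    let cats : List (String × Int) :=
      [("A", (cs.countP (fun c => PySem.Chars.isupper c) : Int)),
       ("a", (cs.countP (fun c => PySem.Chars.islower c) : Int)),
       ("d", (cs.countP (fun c => PySem.Chars.isdigit c) : Int)),
       ("z", (cs.countP (fun c =>
          !(PySem.Chars.isupper c || PySem.Chars.islower c || PySem.Chars.isdigit c)) : Int))]
    PySem.Str.join "" ((cats.filter (fun p => p.2 > 0)).map (fun p => p.1 ++ PySem.Int.toStr p.2))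

-- ===== PRECONDITION & SPEC =====
def Spec_wordShap (token : String) (out : String) : Prop := out = wordShap_alt token
instance (token : String) (out : String) : Decidable (Spec_wordShap token out) := by unfold Spec_wordShap; infer_instance

-- ===== CLAIM (what is proved, stated in full; the proofs are below) =====
def Claim_equal_wordShap : Prop := ∀ (token : String), Dom_wordShap token → Spec_wordShap token (wordShap token)

-- ===== LEMMAS AND PROOFS =====

theorem up_not_low {c : Char} (h : PySem.Chars.isupper c = true) : PySem.Chars.islower c = false := by
  simp [PySem.Chars.isupper, PySem.Chars.islower, Char.le_def, UInt32.le_iff_toNat_le] at *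
  omega

theorem up_not_dig {c : Char} (h : PySem.Chars.isupper c = true) : PySem.Chars.isdigit c = false := by
  simp [PySem.Chars.isupper, PySem.Chars.isdigit, Char.le_def, UInt32.le_iff_toNat_le] at *
  omega

theorem low_not_dig {c : Char} (h : PySem.Chars.islower c = true) : PySem.Chars.isdigit c = false := by
  simp [PySem.Chars.islower, PySem.Chars.isdigit, Char.le_def, UInt32.le_iff_toNat_le] at *
  omega

theorem fold_eq (l : List Char) : ∀ (A a d z : Int),
    l.foldl
      (fun (acc : Int × Int × Int × Int) c =>
        if PySem.Chars.isupper c then (acc.1 + 1, acc.2.1, acc.2.2.1, acc.2.2.2)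
        else if PySem.Chars.islower c then (acc.1, acc.2.1 + 1, acc.2.2.1, acc.2.2.2)
        else if PySem.Chars.isdigit c then (acc.1, acc.2.1, acc.2.2.1 + 1, acc.2.2.2)
        else (acc.1, acc.2.1, acc.2.2.1, acc.2.2.2 + 1)) (A, a, d, z) =
    (A + (l.countP (fun c => PySem.Chars.isupper c) : Int),
     a + (l.countP (fun c => PySem.Chars.islower c) : Int),
     d + (l.countP (fun c => PySem.Chars.isdigit c) : Int),
     z + (l.countP (fun c =>
        !(PySem.Chars.isupper c || PySem.Chars.islower c || PySem.Chars.isdigit c)) : Int)) := by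
  induction l with
  | nil => intro A a d z; simp
  | cons c l ih =>
    intro A a d z
    by_cases hu : PySem.Chars.isupper c = true
    · simp [List.foldl_cons, hu, up_not_low hu, up_not_dig hu, ih]
      omega
    · by_cases hl : PySem.Chars.islower c = true
      · simp [List.foldl_cons, hu, hl, low_not_dig hl, ih]
        omega
      · by_cases hd : PySem.Chars.isdigit c = true
        · simp [List.foldl_cons, hu, hl, hd, ih]
          omega
        · simp [List.foldl_cons, hu, hl, hd, ih]
          omega

theorem build_eq (A a d z : Int) :
    (let ws := ""
     let ws := if A > 0 then ws ++ "A" ++ PySem.Int.toStr A else ws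
     let ws := if a > 0 then ws ++ "a" ++ PySem.Int.toStr a else ws
     let ws := if d > 0 then ws ++ "d" ++ PySem.Int.toStr d else ws
     let ws := if z > 0 then ws ++ "z" ++ PySem.Int.toStr z else ws
     ws) =
    PySem.Str.join ""
      ((([("A", A), ("a", a), ("d", d), ("z", z)] : List (String × Int)).filter
          (fun p => p.2 > 0)).map (fun p => p.1 ++ PySem.Int.toStr p.2)) := by
  rw [← String.toList_inj]
  split_ifs <;>
    simp [*, PySem.Str.join, PySem.Chars.join, List.intercalate,
      PySem.Int.toStr, String.toList_append, String.toList_ofList]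

-- ===== VERDICT (by name: the statement is the Claim_ definition above) =====
set_option maxRecDepth 4096 in
theorem wordShap_spec : Claim_equal_wordShap := by
  intro token _
  unfold Spec_wordShap wordShap wordShap_alt
  by_cases h : token = ""
  · simp [h]
  · simp only [h, if_false]
    rw [fold_eq]
    simp only [zero_add]
    exact build_eq _ _ _ _
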